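-- pv_equiv track=rewrite | github.com/mysportsbetnow24/nfldraftmodel2026 | scripts/import_cfbfastr_p0_csv.py | _target_aliases
-- ===== SOURCE A (Python) =====
-- def _target_aliases(source_type: str) -> dict[str, tuple[str, ...]]:
--     generic = {
--         "qb_ppa_overall": ("qb_ppa_overall", "ppa_overall_qb", "overall_ppa_qb", "ppa_overall"),
--         "qb_ppa_passing": ("qb_ppa_passing", "ppa_passing_qb", "passing_ppa_qb", "ppa_passing"),
--         "qb_ppa_standard_downs": ("qb_ppa_standard_downs", "ppa_standard_downs_qb", "standard_downs_ppa_qb", "ppa_sd_qb"),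
--         "qb_ppa_passing_downs": ("qb_ppa_passing_downs", "ppa_passing_downs_qb", "passing_downs_ppa_qb", "ppa_pd_qb"),
--         "qb_wepa_passing": ("qb_wepa_passing", "wepa_passing_qb", "passing_wepa_qb", "wepa_passing"),
--         "qb_usage_rate": ("qb_usage_rate", "usage_rate_qb", "qb_usage", "usage_qb"),
--         "wrte_ppa_overall": ("wrte_ppa_overall", "wr_ppa_overall", "te_ppa_overall", "ppa_overall_receiving"),
--         "wrte_ppa_passing_downs": ("wrte_ppa_passing_downs", "wr_ppa_passing_downs", "te_ppa_passing_downs", "ppa_passing_downs_receiving"),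
--         "wrte_wepa_receiving": ("wrte_wepa_receiving", "wr_wepa_receiving", "te_wepa_receiving", "wepa_receiving"),
--         "wrte_usage_rate": ("wrte_usage_rate", "wr_usage_rate", "te_usage_rate", "usage_rate_receiving"),
--         "rb_ppa_rushing": ("rb_ppa_rushing", "ppa_rushing_rb", "rushing_ppa_rb", "ppa_rushing"),
--         "rb_ppa_standard_downs": ("rb_ppa_standard_downs", "ppa_standard_downs_rb", "standard_downs_ppa_rb"),
--         "rb_wepa_rushing": ("rb_wepa_rushing", "wepa_rushing_rb", "rushing_wepa_rb", "wepa_rushing"),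
--         "rb_usage_rate": ("rb_usage_rate", "usage_rate_rb", "rb_usage", "usage_rb"),
--     }
--     if source_type == "qb":
--         return {k: v for k, v in generic.items() if k.startswith("qb_")}
--     if source_type == "wrte":
--         return {k: v for k, v in generic.items() if k.startswith("wrte_")}
--     if source_type == "rb":
--         return {k: v for k, v in generic.items() if k.startswith("rb_")}
--     return generic
-- ===== SOURCE B (Python) =====
-- def _entry(first, *rest):
--     # the canonical stat name doubles as the dict key: it is always the first alias
--     return first, (first, *rest)
--
-- _QB = (
--     _entry("qb_ppa_overall", "ppa_overall_qb", "overall_ppa_qb", "ppa_overall"),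
--     _entry("qb_ppa_passing", "ppa_passing_qb", "passing_ppa_qb", "ppa_passing"),
--     _entry("qb_ppa_standard_downs", "ppa_standard_downs_qb", "standard_downs_ppa_qb", "ppa_sd_qb"),
--     _entry("qb_ppa_passing_downs", "ppa_passing_downs_qb", "passing_downs_ppa_qb", "ppa_pd_qb"),
--     _entry("qb_wepa_passing", "wepa_passing_qb", "passing_wepa_qb", "wepa_passing"),
--     _entry("qb_usage_rate", "usage_rate_qb", "qb_usage", "usage_qb"),
-- )
-- _WRTE = (
--     _entry("wrte_ppa_overall", "wr_ppa_overall", "te_ppa_overall", "ppa_overall_receiving"),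
--     _entry("wrte_ppa_passing_downs", "wr_ppa_passing_downs", "te_ppa_passing_downs", "ppa_passing_downs_receiving"),
--     _entry("wrte_wepa_receiving", "wr_wepa_receiving", "te_wepa_receiving", "wepa_receiving"),
--     _entry("wrte_usage_rate", "wr_usage_rate", "te_usage_rate", "usage_rate_receiving"),
-- )
-- _RB = (
--     _entry("rb_ppa_rushing", "ppa_rushing_rb", "rushing_ppa_rb", "ppa_rushing"),
--     _entry("rb_ppa_standard_downs", "ppa_standard_downs_rb", "standard_downs_ppa_rb"),
--     _entry("rb_wepa_rushing", "wepa_rushing_rb", "rushing_wepa_rb", "wepa_rushing"),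
--     _entry("rb_usage_rate", "usage_rate_rb", "rb_usage", "usage_rb"),
-- )
-- _GROUPS = {"qb": _QB, "wrte": _WRTE, "rb": _RB}
--
-- def _target_aliases(source_type: str) -> dict[str, tuple[str, ...]]:
--     sel = _GROUPS.get(source_type)
--     pairs = sel if sel is not None else _QB + _WRTE + _RB
--     return dict(pairs)
-- ===== Notes on version B (the rewrite author's own statement) =====
-- stated objective: alternative
-- what changed: B stores keyless alias tuples pre-grouped by role and derives each dict key as the tuple's first (canonical) alias via an entry constructor; the function becomes a direct role lookup (concatenation of the groups for unknown source types) turned into a dict, eliminating A's keyed table and per-key startswith filtering pass.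
import Mathlib
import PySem

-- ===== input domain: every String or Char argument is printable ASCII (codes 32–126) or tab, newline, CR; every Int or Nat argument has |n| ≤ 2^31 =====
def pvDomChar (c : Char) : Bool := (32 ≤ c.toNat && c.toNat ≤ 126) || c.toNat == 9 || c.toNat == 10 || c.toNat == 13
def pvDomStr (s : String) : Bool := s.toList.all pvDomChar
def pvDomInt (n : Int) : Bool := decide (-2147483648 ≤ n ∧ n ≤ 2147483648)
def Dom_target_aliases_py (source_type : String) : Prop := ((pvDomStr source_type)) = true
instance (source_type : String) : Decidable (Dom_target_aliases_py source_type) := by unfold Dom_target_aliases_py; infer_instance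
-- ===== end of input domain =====

-- B stores keyless pre-grouped alias tuples (the dict key is derived as the first alias via a
-- small entry constructor) and selects by role lookup, concatenating the groups for unknown
-- source types, instead of A's keyed dict literal with a per-key startswith filtering pass;
-- objective: alternative.


-- ===== PORT A =====
-- the 'generic' dict literal of A, in insertion order
def pvGenericA : List (String × List String) :=
  [("qb_ppa_overall", ["qb_ppa_overall", "ppa_overall_qb", "overall_ppa_qb", "ppa_overall"]),
   ("qb_ppa_passing", ["qb_ppa_passing", "ppa_passing_qb", "passing_ppa_qb", "ppa_passing"]),
   ("qb_ppa_standard_downs", ["qb_ppa_standard_downs", "ppa_standard_downs_qb", "standard_downs_ppa_qb", "ppa_sd_qb"]),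
   ("qb_ppa_passing_downs", ["qb_ppa_passing_downs", "ppa_passing_downs_qb", "passing_downs_ppa_qb", "ppa_pd_qb"]),
   ("qb_wepa_passing", ["qb_wepa_passing", "wepa_passing_qb", "passing_wepa_qb", "wepa_passing"]),
   ("qb_usage_rate", ["qb_usage_rate", "usage_rate_qb", "qb_usage", "usage_qb"]),
   ("wrte_ppa_overall", ["wrte_ppa_overall", "wr_ppa_overall", "te_ppa_overall", "ppa_overall_receiving"]),
   ("wrte_ppa_passing_downs", ["wrte_ppa_passing_downs", "wr_ppa_passing_downs", "te_ppa_passing_downs", "ppa_passing_downs_receiving"]),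
   ("wrte_wepa_receiving", ["wrte_wepa_receiving", "wr_wepa_receiving", "te_wepa_receiving", "wepa_receiving"]),
   ("wrte_usage_rate", ["wrte_usage_rate", "wr_usage_rate", "te_usage_rate", "usage_rate_receiving"]),
   ("rb_ppa_rushing", ["rb_ppa_rushing", "ppa_rushing_rb", "rushing_ppa_rb", "ppa_rushing"]),
   ("rb_ppa_standard_downs", ["rb_ppa_standard_downs", "ppa_standard_downs_rb", "standard_downs_ppa_rb"]),
   ("rb_wepa_rushing", ["rb_wepa_rushing", "wepa_rushing_rb", "rushing_wepa_rb", "wepa_rushing"]),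
   ("rb_usage_rate", ["rb_usage_rate", "usage_rate_rb", "rb_usage", "usage_rb"])]

def target_aliases_py (source_type : String) : List (String × List String) :=
  if source_type == "qb" then
    pvGenericA.filter (fun kv => PySem.Str.startswith kv.1 "qb_")
  else if source_type == "wrte" then
    pvGenericA.filter (fun kv => PySem.Str.startswith kv.1 "wrte_")
  else if source_type == "rb" then
    pvGenericA.filter (fun kv => PySem.Str.startswith kv.1 "rb_")
  else
    pvGenericA

-- ===== PORT B =====
-- _entry(first, *rest): the canonical stat name doubles as the dict key
def pvEntry (first : String) (rest : List String) : String × List String :=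
  (first, first :: rest)

def pvQB : List (String × List String) :=
  [pvEntry "qb_ppa_overall" ["ppa_overall_qb", "overall_ppa_qb", "ppa_overall"],
   pvEntry "qb_ppa_passing" ["ppa_passing_qb", "passing_ppa_qb", "ppa_passing"],
   pvEntry "qb_ppa_standard_downs" ["ppa_standard_downs_qb", "standard_downs_ppa_qb", "ppa_sd_qb"],
   pvEntry "qb_ppa_passing_downs" ["ppa_passing_downs_qb", "passing_downs_ppa_qb", "ppa_pd_qb"],
   pvEntry "qb_wepa_passing" ["wepa_passing_qb", "passing_wepa_qb", "wepa_passing"],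
   pvEntry "qb_usage_rate" ["usage_rate_qb", "qb_usage", "usage_qb"]]

def pvWRTE : List (String × List String) :=
  [pvEntry "wrte_ppa_overall" ["wr_ppa_overall", "te_ppa_overall", "ppa_overall_receiving"],
   pvEntry "wrte_ppa_passing_downs" ["wr_ppa_passing_downs", "te_ppa_passing_downs", "ppa_passing_downs_receiving"],
   pvEntry "wrte_wepa_receiving" ["wr_wepa_receiving", "te_wepa_receiving", "wepa_receiving"],
   pvEntry "wrte_usage_rate" ["wr_usage_rate", "te_usage_rate", "usage_rate_receiving"]]

def pvRB : List (String × List String) :=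
  [pvEntry "rb_ppa_rushing" ["ppa_rushing_rb", "rushing_ppa_rb", "ppa_rushing"],
   pvEntry "rb_ppa_standard_downs" ["ppa_standard_downs_rb", "standard_downs_ppa_rb"],
   pvEntry "rb_wepa_rushing" ["wepa_rushing_rb", "rushing_wepa_rb", "wepa_rushing"],
   pvEntry "rb_usage_rate" ["usage_rate_rb", "rb_usage", "usage_rb"]]

def pvGroups : PySem.Dict String (List (String × List String)) :=
  PySem.Dict.ofList [("qb", pvQB), ("wrte", pvWRTE), ("rb", pvRB)]

def target_aliases_py_alt (source_type : String) : List (String × List String) :=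
  let pairs := match PySem.Dict.get? pvGroups source_type with
    | some sel => sel
    | none => pvQB ++ pvWRTE ++ pvRB
  (PySem.Dict.ofList pairs).items

-- ===== PRECONDITION & SPEC =====
def Spec_target_aliases_py (source_type : String) (out : List (String × List String)) : Prop := out = target_aliases_py_alt source_type
instance (source_type : String) (out : List (String × List String)) : Decidable (Spec_target_aliases_py source_type out) := by unfold Spec_target_aliases_py; infer_instance

-- ===== CLAIM =====
def Claim_equal_target_aliases_py : Prop := ∀ (source_type : String), Dom_target_aliases_py source_type → Spec_target_aliases_py source_type (target_aliases_py source_type)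

-- ===== LEMMAS AND PROOFS =====
theorem pvGroups_eq_mk :
    pvGroups = PySem.Dict.mk [("qb", pvQB), ("wrte", pvWRTE), ("rb", pvRB)] := by decide

-- ===== VERDICT =====
theorem target_aliases_py_spec : Claim_equal_target_aliases_py := by
  intro s _
  unfold Spec_target_aliases_py target_aliases_py target_aliases_py_alt
  by_cases h1 : s = "qb"
  · subst h1; decide
  · by_cases h2 : s = "wrte"
    · subst h2; decide
    · by_cases h3 : s = "rb"
      · subst h3; decide
      · have b1 : ("qb" == s) = false := by simp [Ne.symm h1]
        have b2 : ("wrte" == s) = false := by simp [Ne.symm h2]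
        have b3 : ("rb" == s) = false := by simp [Ne.symm h3]
        rw [pvGroups_eq_mk]
        simp only [beq_iff_eq, h1, h2, h3, if_false, PySem.Dict.get?, List.find?, b1, b2, b3]
        decide
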